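-- pv_equiv track=rewrite | github.com/carlosabadia/WordPuzzleSolver | solver.py | get_colums_and_rows
-- ===== SOURCE A (Python) =====
-- def get_colums_and_rows(listaCuadrados):
--     columnas = 0
--     filas = 1
--     alturaAnt = listaCuadrados[0]["altura"]
--     for lista in listaCuadrados:
--         if (lista["altura"] > alturaAnt + 6):
--             filas = filas + 1
--         alturaAnt = lista["altura"]
--         if (filas == 1):
--             columnas = columnas + 1
--     return filas, columnas
-- ===== SOURCE B (Python) =====
-- def split_rows(hs):
--     """Split the height list into the grid's consecutive rows: a new row
--     starts whenever a height jumps by more than 6 over its predecessor."""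
--     for i in range(1, len(hs)):
--         if hs[i] > hs[i - 1] + 6:
--             return [hs[:i]] + split_rows(hs[i:])
--     return [hs]
--
--
-- def get_colums_and_rows(listaCuadrados):
--     groups = split_rows([d["altura"] for d in listaCuadrados])
--     return len(groups), len(groups[0])
-- ===== Notes on version B (the rewrite author's own statement) =====
-- stated objective: alternative
-- what changed: Instead of one stateful fold carrying filas/columnas/alturaAnt, B recursively SPLITS the height list into the grid's row groups (cut before each height jump of more than 6) and reads off rows = number of groups, columns = size of the first group.
import Mathlib
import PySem

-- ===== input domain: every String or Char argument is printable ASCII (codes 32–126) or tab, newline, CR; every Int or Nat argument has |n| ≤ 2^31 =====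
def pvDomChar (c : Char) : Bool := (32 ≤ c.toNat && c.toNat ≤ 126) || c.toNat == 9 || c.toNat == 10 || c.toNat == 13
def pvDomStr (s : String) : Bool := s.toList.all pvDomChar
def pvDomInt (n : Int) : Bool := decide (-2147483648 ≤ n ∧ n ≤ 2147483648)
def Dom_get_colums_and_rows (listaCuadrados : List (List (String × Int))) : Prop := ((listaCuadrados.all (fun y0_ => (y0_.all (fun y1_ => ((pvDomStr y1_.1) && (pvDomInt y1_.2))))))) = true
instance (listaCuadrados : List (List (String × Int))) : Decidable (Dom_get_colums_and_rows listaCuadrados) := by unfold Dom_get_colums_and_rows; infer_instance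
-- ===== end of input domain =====

-- B recursively splits the height list into the grid's row groups (cut before each jump > 6)
-- and reads rows/columns off the group structure, instead of A's stateful single fold.
-- Same cost; on [] A raises IndexError (outside Pre_).

-- ===== PORT A =====
-- dict access lista["altura"]: getD is exact under Pre_ (key present in every element)
def get_colums_and_rows (listaCuadrados : List (List (String × Int))) : Int × Int :=
  let alturaAnt0 : Int :=
    (PySem.Dict.mk ((PySem.List.pyGet? listaCuadrados 0).getD [])).getD "altura" 0
  let s := listaCuadrados.foldl
    (fun (st : Int × Int × Int) lista =>
      let filas := st.1
      let columnas := st.2.1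
      let alturaAnt := st.2.2
      let h := (PySem.Dict.mk lista).getD "altura" 0
      let filas := if h > alturaAnt + 6 then filas + 1 else filas
      let columnas := if filas = 1 then columnas + 1 else columnas
      (filas, columnas, h))
    (1, 0, alturaAnt0)
  (s.1, s.2.1)

-- ===== PORT B =====
-- Source B's `for i in range(1, len(hs)): if hs[i] > hs[i-1]+6: return i`-scan, ported as the
-- obvious structural recursion carrying the previous element and the running index
def firstBreakAux (prev : Int) (rest : List Int) (i : Nat) : Option Nat :=
  match rest with
  | [] => none
  | h :: t => if h > prev + 6 then some i else firstBreakAux h t (i + 1)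

def firstBreak (hs : List Int) : Option Nat :=
  match hs with
  | [] => none
  | h :: t => firstBreakAux h t 1

-- bounds needed by splitRows's termination, cited in decreasing_by
theorem firstBreakAux_bounds (rest : List Int) : ∀ (prev : Int) (i j : Nat),
    firstBreakAux prev rest i = some j → i ≤ j ∧ j < i + rest.length := by
  induction rest with
  | nil => intro prev i j h; simp [firstBreakAux] at h
  | cons h t ih =>
    intro prev i j hfb
    simp only [firstBreakAux] at hfb
    by_cases hc : h > prev + 6
    · rw [if_pos hc] at hfb
      injection hfb with hj; subst hj
      have hl : (h :: t).length = t.length + 1 := rfl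
      omega
    · rw [if_neg hc] at hfb
      have := ih h (i + 1) j hfb
      have hl : (h :: t).length = t.length + 1 := rfl
      omega

theorem firstBreak_bounds (hs : List Int) (j : Nat) (h : firstBreak hs = some j) :
    1 ≤ j ∧ j < hs.length := by
  match hs with
  | [] => simp [firstBreak] at h
  | a :: t =>
    simp only [firstBreak] at h
    have := firstBreakAux_bounds t a 1 j h
    have hl : (a :: t).length = t.length + 1 := rfl
    omega

-- hs[:i] / hs[i:] for 0 ≤ i ≤ len are exactly take/drop
def splitRows (hs : List Int) : List (List Int) :=
  match hfb : firstBreak hs with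
  | none => [hs]
  | some i => hs.take i :: splitRows (hs.drop i)
termination_by hs.length
decreasing_by
  have := firstBreak_bounds hs i hfb
  simp only [List.length_drop]; omega

def get_colums_and_rows_alt (listaCuadrados : List (List (String × Int))) : Int × Int :=
  let groups := splitRows (listaCuadrados.map (fun d => (PySem.Dict.mk d).getD "altura" 0))
  ((groups.length : Int), (((groups.headD []).length : Int)))

-- ===== PRECONDITION & SPEC =====
-- Pre_: the inputs on which Python A returns: a nonempty list whose every element carries the key
-- "altura" (otherwise A raises IndexError / KeyError).
def Pre_get_colums_and_rows (listaCuadrados : List (List (String × Int))) : Prop :=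
  listaCuadrados ≠ [] ∧ ∀ d ∈ listaCuadrados, ((PySem.Dict.mk d).get? "altura").isSome
instance (listaCuadrados : List (List (String × Int))) : Decidable (Pre_get_colums_and_rows listaCuadrados) := by
  unfold Pre_get_colums_and_rows; infer_instance
def pvWitness_get_colums_and_rows : (List (List (String × Int))) := [[("altura", 10)], [("altura", 20)]]

def Spec_get_colums_and_rows (listaCuadrados : List (List (String × Int))) (out : Int × Int) : Prop := out = get_colums_and_rows_alt listaCuadrados
instance (listaCuadrados : List (List (String × Int))) (out : Int × Int) : Decidable (Spec_get_colums_and_rows listaCuadrados out) := by unfold Spec_get_colums_and_rows; infer_instance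

-- ===== CLAIM (what is proved, stated in full; the proofs are below) =====
def Claim_equal_get_colums_and_rows : Prop := ∀ (listaCuadrados : List (List (String × Int))), Dom_get_colums_and_rows listaCuadrados → Pre_get_colums_and_rows listaCuadrados → Spec_get_colums_and_rows listaCuadrados (get_colums_and_rows listaCuadrados)

-- ===== LEMMAS AND PROOFS =====

-- number of transitions along the chain prev, hs[0], hs[1], …
def tcount (prev : Int) : List Int → Int
  | [] => 0
  | h :: t => (if h > prev + 6 then 1 else 0) + tcount h t

-- index of the first transition along the chain (= length if none)
def tfirst (prev : Int) : List Int → Int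
  | [] => 0
  | h :: t => if h > prev + 6 then 0 else 1 + tfirst h t

def stepA (st : Int × Int × Int) (h : Int) : Int × Int × Int :=
  let filas := if h > st.2.2 + 6 then st.1 + 1 else st.1
  let columnas := if filas = 1 then st.2.1 + 1 else st.2.1
  (filas, columnas, h)

theorem foldA_eq (hs : List Int) : ∀ (f c prev : Int), 1 ≤ f →
    (hs.foldl stepA (f, c, prev)).1 = f + tcount prev hs ∧
    (hs.foldl stepA (f, c, prev)).2.1 = if f = 1 then c + tfirst prev hs else c := by
  induction hs with
  | nil => intro f c prev hf; simp [tcount, tfirst]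
  | cons h t ih =>
    intro f c prev hf
    simp only [List.foldl_cons]
    by_cases ht : h > prev + 6
    · have h2 : ¬ (f + 1 = 1) := by omega
      have := ih (f + 1) (if f + 1 = 1 then c + 1 else c) h (by omega)
      simp only [stepA, ht, if_pos, h2, if_neg h2, tcount, tfirst, if_true] at this ⊢
      rcases this with ⟨h1, hcol⟩
      constructor
      · rw [h1]; ring
      · rw [hcol]; by_cases hf1 : f = 1 <;> simp [hf1] <;> omega
    · have := ih f (if f = 1 then c + 1 else c) h hf
      simp only [stepA, ht, if_neg, ite_false, tcount, tfirst] at this ⊢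
      rcases this with ⟨h1, hcol⟩
      refine ⟨by rw [h1]; ring, ?_⟩
      rw [hcol]; by_cases hf1 : f = 1 <;> simp [hf1] <;> omega

theorem firstBreakAux_shift (rest : List Int) : ∀ (prev : Int) (i : Nat),
    firstBreakAux prev rest (i + 1) = (firstBreakAux prev rest i).map (· + 1) := by
  induction rest with
  | nil => intro prev i; simp [firstBreakAux]
  | cons h t ih =>
    intro prev i
    by_cases hc : h > prev + 6 <;> simp [firstBreakAux, hc, ih h (i + 1)]

theorem splitRows_singleton_step (hs : List Int) (h : firstBreak hs = none) :
    splitRows hs = [hs] := by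
  rw [splitRows]; split
  · rfl
  · rename_i i hfb; rw [h] at hfb; exact absurd hfb (by simp)

theorem splitRows_break_step (hs : List Int) (i : Nat) (h : firstBreak hs = some i) :
    splitRows hs = hs.take i :: splitRows (hs.drop i) := by
  rw [splitRows]; split
  · rename_i hfb; rw [h] at hfb; exact absurd hfb (by simp)
  · rename_i j hfb; rw [h] at hfb; injection hfb with hj; subst hj; rfl

-- the cons-recurrence the induction runs on
theorem splitRows_cons (prev h : Int) (t : List Int) :
    splitRows (prev :: h :: t) =
      if h > prev + 6 then [prev] :: splitRows (h :: t)
      else match splitRows (h :: t) with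
        | [] => [[prev]]
        | g :: gs => (prev :: g) :: gs := by
  by_cases hc : h > prev + 6
  · rw [if_pos hc]
    have hfb : firstBreak (prev :: h :: t) = some 1 := by
      simp [firstBreak, firstBreakAux, hc]
    rw [splitRows_break_step _ 1 hfb]; rfl
  · rw [if_neg hc]
    have hfb : firstBreak (prev :: h :: t) = firstBreakAux h t 2 := by
      simp [firstBreak, firstBreakAux, hc]
    have hsh : firstBreakAux h t 2 = (firstBreakAux h t 1).map (· + 1) :=
      firstBreakAux_shift t h 1
    cases hft : firstBreakAux h t 1 with
    | none =>
      have h1 : firstBreak (prev :: h :: t) = none := by rw [hfb, hsh, hft]; rfl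
      have h2 : firstBreak (h :: t) = none := by simp [firstBreak, hft]
      rw [splitRows_singleton_step _ h1, splitRows_singleton_step _ h2]
    | some j =>
      have h1 : firstBreak (prev :: h :: t) = some (j + 1) := by rw [hfb, hsh, hft]; rfl
      have h2 : firstBreak (h :: t) = some j := by simp [firstBreak, hft]
      rw [splitRows_break_step _ _ h1, splitRows_break_step _ _ h2]
      simp

theorem splitRows_ne_nil (hs : List Int) : splitRows hs ≠ [] := by
  rw [splitRows]; split <;> simp

-- B's group structure realises tcount/tfirst
theorem splitRows_eq (t : List Int) : ∀ (prev : Int),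
    ((splitRows (prev :: t)).length : Int) = 1 + tcount prev t ∧
    (((splitRows (prev :: t)).headD []).length : Int) = 1 + tfirst prev t := by
  induction t with
  | nil =>
    intro prev
    have : firstBreak [prev] = none := by simp [firstBreak, firstBreakAux]
    rw [splitRows_singleton_step _ this]
    simp [tcount, tfirst]
  | cons h t' ih =>
    intro prev
    rw [splitRows_cons]
    by_cases hc : h > prev + 6
    · rcases ih h with ⟨h1, _⟩
      simp only [if_pos hc, tcount, tfirst, hc, if_true, List.length_cons, List.headD_cons]
      constructor
      · push_cast; rw [h1]; ring
      · simp
    · rw [if_neg hc]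
      rcases ih h with ⟨h1, h2⟩
      cases hsp : splitRows (h :: t') with
      | nil => exact absurd hsp (splitRows_ne_nil _)
      | cons g gs =>
        rw [hsp] at h1 h2
        simp only [List.length_cons, List.headD_cons] at h1 h2 ⊢
        simp only [tcount, tfirst, hc, if_neg, ite_false]
        constructor
        · push_cast at h1 ⊢; omega
        · push_cast at h2 ⊢; omega

-- ===== VERDICT (by name: the statement is the Claim_ definition above) =====
theorem get_colums_and_rows_spec : Claim_equal_get_colums_and_rows := by
  intro l _hdom hpre
  unfold Spec_get_colums_and_rows
  obtain ⟨hne, -⟩ := hpre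
  obtain ⟨d, ds, rfl⟩ := List.exists_cons_of_ne_nil hne
  unfold get_colums_and_rows get_colums_and_rows_alt
  simp only [PySem.List.pyGet?_zero_cons, Option.getD_some]
  set h0 : Int := (PySem.Dict.mk d).getD "altura" 0 with hh0
  set t : List Int := ds.map (fun d => (PySem.Dict.mk d).getD "altura" 0) with htl
  have hmap : (d :: ds).map (fun d => (PySem.Dict.mk d).getD "altura" 0) = h0 :: t := by
    simp [hh0, htl]
  have hfold : (d :: ds).foldl
      (fun (st : Int × Int × Int) lista =>
        let filas := st.1
        let columnas := st.2.1
        let alturaAnt := st.2.2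
        let h := (PySem.Dict.mk lista).getD "altura" 0
        let filas := if h > alturaAnt + 6 then filas + 1 else filas
        let columnas := if filas = 1 then columnas + 1 else columnas
        (filas, columnas, h)) (1, 0, h0)
      = (h0 :: t).foldl stepA (1, 0, h0) := by
    rw [← hmap, List.foldl_map]
    rfl
  rw [hfold, hmap]
  have hA := foldA_eq (h0 :: t) 1 0 h0 (by omega)
  have hB := splitRows_eq t h0
  have hnotrans : ¬ (h0 > h0 + 6) := by omega
  have hc : tcount h0 (h0 :: t) = tcount h0 t := by simp [tcount, hnotrans]
  have hf : tfirst h0 (h0 :: t) = 1 + tfirst h0 t := by simp [tfirst, hnotrans]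
  rcases hA with ⟨hA1, hA2⟩
  rcases hB with ⟨hB1, hB2⟩
  refine Prod.ext ?_ ?_
  · simp only [hA1, hc, hB1]
  · simp only [hA2, if_pos rfl, hf, hB2]; simp
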